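-- pv_equiv track=rewrite | github.com/Elder19/ING-COMPUTACION | intro y taller semestre 1/taller/labs-examen/Examen1.py | crearmodulo
-- ===== SOURCE A (Python) =====
-- def crearmodulo(grupo):
--     modulo=10
--     contador=1
--     if grupo==1:
--         return modulo
--     while contador<=grupo:
--         modulo*=10
--         contador+=2
--
--     return modulo
-- ===== SOURCE B (Python) =====
-- def crearmodulo(grupo):
--     # closed form: the loop of A runs (grupo + 1) // 2 times for grupo >= 2
--     if grupo <= 1:
--         return 10
--     return 10 ** (1 + (grupo + 1) // 2)
-- ===== Notes on version B (the rewrite author's own statement) =====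
-- stated objective: simpler
-- what changed: Replaced A's while-loop accumulation (repeated multiplication by ten while an odd counter stays below grupo) with a single closed-form power of ten whose exponent is one plus half of (grupo plus one), with one guard returning the base for grupo at most one.
import Mathlib
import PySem

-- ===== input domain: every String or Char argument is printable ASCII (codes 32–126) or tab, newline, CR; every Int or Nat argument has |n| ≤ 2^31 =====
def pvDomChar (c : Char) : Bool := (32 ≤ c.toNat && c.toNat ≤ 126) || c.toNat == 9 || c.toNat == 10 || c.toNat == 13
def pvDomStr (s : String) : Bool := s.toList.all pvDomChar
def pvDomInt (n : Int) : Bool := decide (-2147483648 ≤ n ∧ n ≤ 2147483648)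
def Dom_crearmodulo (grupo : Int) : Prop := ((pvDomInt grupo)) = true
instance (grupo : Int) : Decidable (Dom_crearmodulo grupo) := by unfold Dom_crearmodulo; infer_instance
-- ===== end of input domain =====

-- B replaces A's while-loop accumulation with one closed-form power expression (objective: simpler).

-- ===== PORT A =====
-- the 'while contador<=grupo: modulo*=10; contador+=2' loop of A, step for step
def crearmoduloLoop (grupo modulo contador : Int) : Int :=
  if contador ≤ grupo then crearmoduloLoop grupo (modulo * 10) (contador + 2)
  else modulo
termination_by (grupo + 1 - contador).toNat
decreasing_by omega

def crearmodulo (grupo : Int) : Int :=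
  if grupo = 1 then 10
  else crearmoduloLoop grupo 10 1

-- ===== PORT B =====
def crearmodulo_alt (grupo : Int) : Int :=
  if grupo ≤ 1 then 10
  else 10 ^ (1 + PySem.Int.floordiv (grupo + 1) 2).toNat

-- ===== PRECONDITION & SPEC =====
def Spec_crearmodulo (grupo : Int) (out : Int) : Prop := out = crearmodulo_alt grupo
instance (grupo : Int) (out : Int) : Decidable (Spec_crearmodulo grupo out) := by unfold Spec_crearmodulo; infer_instance

-- ===== CLAIM (what is proved, stated in full; the proofs are below) =====
def Claim_equal_crearmodulo : Prop := ∀ (grupo : Int), Dom_crearmodulo grupo → Spec_crearmodulo grupo (crearmodulo grupo)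

-- ===== LEMMAS AND PROOFS =====

-- closed form of A's loop: it multiplies by 10 once per odd counter value ≤ grupo
theorem crearmoduloLoop_eq (grupo modulo contador : Int) :
    crearmoduloLoop grupo modulo contador = modulo * 10 ^ ((grupo + 2 - contador) / 2).toNat := by
  rw [crearmoduloLoop]
  split
  · rename_i h
    rw [crearmoduloLoop_eq grupo (modulo * 10) (contador + 2)]
    have h2 : (grupo + 2 - contador) / 2 = (grupo + 2 - (contador + 2)) / 2 + 1 := by omega
    have h3 : 0 ≤ (grupo + 2 - (contador + 2)) / 2 := by omega
    rw [h2]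
    have h4 : ((grupo + 2 - (contador + 2)) / 2 + 1).toNat
        = ((grupo + 2 - (contador + 2)) / 2).toNat + 1 := by omega
    rw [h4, pow_succ]
    ring
  · rename_i h
    have h2 : ((grupo + 2 - contador) / 2).toNat = 0 := by omega
    rw [h2, pow_zero, mul_one]
termination_by (grupo + 1 - contador).toNat
decreasing_by omega

-- ===== VERDICT (by name: the statement is the Claim_ definition above) =====
theorem crearmodulo_spec : Claim_equal_crearmodulo := by
  intro grupo _
  unfold Spec_crearmodulo crearmodulo crearmodulo_alt
  by_cases h1 : grupo = 1
  · simp [h1]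
  · simp only [if_neg h1]
    rw [crearmoduloLoop_eq]
    by_cases h2 : grupo ≤ 1
    · have : ((grupo + 2 - 1) / 2).toNat = 0 := by omega
      simp [h2, this]
    · rw [if_neg h2, PySem.Int.floordiv_eq_ediv_of_pos (by omega)]
      have hq : 0 ≤ (grupo + 1) / 2 := by omega
      have h4 : (1 + (grupo + 1) / 2).toNat = ((grupo + 1) / 2).toNat + 1 := by omega
      have h5 : (grupo + 2 - 1) / 2 = (grupo + 1) / 2 := by ring_nf
      rw [h4, h5, pow_succ]
      ring
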